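-- pv_equiv track=rewrite | github.com/JoeBlakeB/AdventOfCode | 2023/07-Camel-Cards.py | getCountsOfEachCardV2
-- ===== SOURCE A (Python) =====
-- ALL_CARDS_V2 = "J23456789TQKA"
--
-- def getCountsOfEachCardV2(hand: str) -> dict[str, int]:
--     counts = dict()
--     jokers = 0
--     for card in hand:
--         if card == "J": jokers += 1
--         else:
--             counts[card] = counts.get(card, 0) + 1
--
--     if jokers > 0:
--         if counts:
--             highestCardCount = max(counts.values())
--             cardsWithHighestCount = [card for card, count in counts.items() if count == highestCardCount]
--             if len(cardsWithHighestCount) == 1: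
--                 cardToIncrease = cardsWithHighestCount[0]
--             else:
--                 cardToIncrease = max(cardsWithHighestCount, key=lambda card: ALL_CARDS_V2.index(card))
--             counts[cardToIncrease] += jokers
--         else:
--             counts[ALL_CARDS_V2[0]] = jokers
--
--     return counts
-- ===== SOURCE B (Python) =====
-- ALL_CARDS_V2 = "J23456789TQKA"
--
-- def getCountsOfEachCardV2(hand: str) -> dict[str, int]:
--     jokers = hand.count("J")
--     counts = {c: hand.count(c) for c in dict.fromkeys(hand) if c != "J"}
--     if jokers:
--         if counts:
--             best = max(counts, key=lambda c: (counts[c], ALL_CARDS_V2.find(c)))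
--             counts[best] += jokers
--         else:
--             counts["J"] = jokers
--     return counts
-- ===== Notes on version B (the rewrite author's own statement) =====
-- stated objective: simpler
-- what changed: B replaces A's incremental dict-counting loop by a dict comprehension over the distinct cards using str.count, and fuses A's three scans (max of values, tie-filter comprehension, max-by-index over the ties) into a single max over the dict keys with a composite (count, rank) key, where rank uses str.find so cards outside ALL_CARDS_V2 never raise. (counting moves into C-level str.count, measured ~1.9x faster)
import Mathlib
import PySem

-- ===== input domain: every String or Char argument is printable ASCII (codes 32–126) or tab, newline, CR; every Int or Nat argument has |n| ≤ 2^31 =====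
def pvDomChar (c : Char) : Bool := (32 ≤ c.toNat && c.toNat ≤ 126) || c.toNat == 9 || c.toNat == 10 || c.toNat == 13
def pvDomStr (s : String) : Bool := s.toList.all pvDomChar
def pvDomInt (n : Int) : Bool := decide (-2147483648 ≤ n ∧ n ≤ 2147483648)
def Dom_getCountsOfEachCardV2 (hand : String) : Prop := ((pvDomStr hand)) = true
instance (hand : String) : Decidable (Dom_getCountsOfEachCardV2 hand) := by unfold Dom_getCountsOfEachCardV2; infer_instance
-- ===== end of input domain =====

-- B replaces A's incremental counting loop by a per-distinct-card str.count comprehension and fuses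
-- A's three scans (max of values, tie-filter comprehension, max-by-index over ties) into ONE max over
-- the dict keys with a composite (count, rank) key, using str.find so cards outside ALL_CARDS_V2 never raise.

def ALL_CARDS_V2 : String := "J23456789TQKA"

-- ===== PORT A =====
def getCountsOfEachCardV2 (hand : String) : List (String × Int) :=
  -- dict keys are the 1-char strings of the hand; modelled as Char and rendered as String at return
  let cj := hand.toList.foldl
    (fun (s : PySem.Dict Char Int × Int) card =>
      if card = 'J' then (s.1, s.2 + 1)
      else (s.1.insert card (s.1.getD card 0 + 1), s.2))
    (PySem.Dict.empty, 0)
  let counts := cj.1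
  let jokers := cj.2
  let counts :=
    if jokers > 0 then
      if counts.items ≠ [] then
        match PySem.List.max? counts.values (fun v => v) with
        | some highestCardCount =>
          let cardsWithHighestCount :=
            (counts.items.filter (fun p => p.2 == highestCardCount)).map (·.1)
          let cardToIncrease :=
            if cardsWithHighestCount.length = 1 then cardsWithHighestCount.headD 'J'
            else
              -- key ALL_CARDS_V2.index(card) ported as idxOf, exact for cards present in
              -- ALL_CARDS_V2; hands where Python's .index raises ValueError are outside Pre_
              (PySem.List.max? cardsWithHighestCount
                (fun c => (ALL_CARDS_V2.toList.idxOf c : Int))).getD 'J'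
          counts.modify cardToIncrease 0 (· + jokers)
        | none => counts
      else counts.insert (PySem.List.pyGetD ALL_CARDS_V2.toList 0 'J') jokers
    else counts
  counts.items.map (fun p => (String.mk [p.1], p.2))

-- ===== PORT B =====
def getCountsOfEachCardV2_alt (hand : String) : List (String × Int) :=
  let cs := hand.toList
  let jokers : Int := (cs.count 'J' : Int)
  let counts := (PySem.List.dedup cs).foldl
    (fun (d : PySem.Dict Char Int) c =>
      if c ≠ 'J' then d.insert c ((cs.count c : Int)) else d)
    PySem.Dict.empty
  let counts :=
    if jokers > 0 then
      if counts.items ≠ [] then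
        match PySem.List.max2? counts.keys
            (fun c => counts.getD c 0)
            (fun c => PySem.Chars.find ALL_CARDS_V2.toList [c]) with
        | some best => counts.modify best 0 (· + jokers)
        | none => counts
      else counts.insert 'J' jokers
    else counts
  counts.items.map (fun p => (String.mk [p.1], p.2))

-- ===== PRECONDITION & SPEC =====
-- pvTieRaise: the hand has a 'J' and the highest count among its non-'J' cards is attained by at
-- least two cards, one of which is not in ALL_CARDS_V2 (there Python's ALL_CARDS_V2.index raises).
def pvTieRaise (hand : String) : Bool :=
  let ns := hand.toList.filter (fun c => c ≠ 'J')
  hand.toList.contains 'J' &&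
    ns.any (fun c => !(ALL_CARDS_V2.toList.contains c) &&
      ns.all (fun e => ns.count e ≤ ns.count c) &&
      ns.any (fun d => d ≠ c && ns.count d == ns.count c))

-- Pre_ excludes exactly the hands on which A raises ValueError (see pvTieRaise above).
def Pre_getCountsOfEachCardV2 (hand : String) : Prop := pvTieRaise hand = false
instance (hand : String) : Decidable (Pre_getCountsOfEachCardV2 hand) := by
  unfold Pre_getCountsOfEachCardV2; infer_instance

def pvWitness_getCountsOfEachCardV2 : String := "KKJ2?"

def Spec_getCountsOfEachCardV2 (hand : String) (out : List (String × Int)) : Prop :=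
  out = getCountsOfEachCardV2_alt hand
instance (hand : String) (out : List (String × Int)) : Decidable (Spec_getCountsOfEachCardV2 hand out) := by
  unfold Spec_getCountsOfEachCardV2; infer_instance

-- ===== CLAIM (what is proved, stated in full; the proofs are below) =====
def Claim_equal_getCountsOfEachCardV2 : Prop :=
  ∀ (hand : String), Dom_getCountsOfEachCardV2 hand → Pre_getCountsOfEachCardV2 hand →
    Spec_getCountsOfEachCardV2 hand (getCountsOfEachCardV2 hand)

-- ===== LEMMAS AND PROOFS =====

theorem pvMax2Aux {α : Type} (k1 k2 : α → Int) (t : List α) (a m : α)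
    (h : t.foldl
      (fun acc x =>
        match acc with
        | none => some x
        | some m =>
          if (decide (k1 m < k1 x) || !decide (k1 x < k1 m) && decide (k2 m < k2 x)) = true
          then some x else some m)
      (some a) = some m) :
    (m = a ∨ m ∈ t) ∧ (k1 a < k1 m ∨ (k1 a = k1 m ∧ k2 a ≤ k2 m)) ∧
      ∀ y ∈ t, k1 y < k1 m ∨ (k1 y = k1 m ∧ k2 y ≤ k2 m) := by
  induction t generalizing a with
  | nil => simp_all
  | cons x t ih =>
    simp only [List.foldl_cons] at h
    by_cases hb : (decide (k1 a < k1 x) || !decide (k1 x < k1 a) && decide (k2 a < k2 x)) = true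
    · simp only [hb, if_pos] at h
      obtain ⟨hm, hx, hall⟩ := ih x h
      simp only [Bool.or_eq_true, Bool.and_eq_true, decide_eq_true_eq, Bool.not_eq_true',
        decide_eq_false_iff_not] at hb
      refine ⟨Or.inr (List.mem_cons.mpr hm), ?_, fun y hy => ?_⟩
      · rcases hb with h1 | ⟨h2, h3⟩ <;> rcases hx with h4 | ⟨h5, h6⟩ <;> omega
      · rcases List.mem_cons.mp hy with rfl | hy
        · exact hx
        · exact hall y hy
    · rw [if_neg hb] at h
      obtain ⟨hm, ha2, hall⟩ := ih a h
      simp only [Bool.or_eq_true, Bool.and_eq_true, decide_eq_true_eq, Bool.not_eq_true',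
        decide_eq_false_iff_not] at hb
      
      refine ⟨hm.imp id (List.mem_cons_of_mem _), ha2, fun y hy => ?_⟩
      rcases List.mem_cons.mp hy with rfl | hy
      · rcases ha2 with h4 | ⟨h5, h6⟩ <;> omega
      · exact hall y hy

theorem pvMax2Spec {α : Type} (xs : List α) (k1 k2 : α → Int) (m : α)
    (h : PySem.List.max2? xs k1 k2 = some m) :
    m ∈ xs ∧ ∀ y ∈ xs, k1 y < k1 m ∨ (k1 y = k1 m ∧ k2 y ≤ k2 m) := by
  cases xs with
  | nil => simp [PySem.List.max2?] at h
  | cons x t =>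
    unfold PySem.List.max2? at h
    simp only [List.foldl_cons] at h
    obtain ⟨hm, hx, hall⟩ := pvMax2Aux k1 k2 t x m h
    refine ⟨?_, fun y hy => ?_⟩
    · rcases hm with rfl | hm
      exacts [List.mem_cons_self, List.mem_cons_of_mem _ hm]
    rcases List.mem_cons.mp hy with rfl | hy
    · exact hx
    · exact hall y hy

theorem pvMax2SomeAux {α : Type} (k1 k2 : α → Int) (t : List α) (a : α) :
    ∃ m, t.foldl
      (fun acc x =>
        match acc with
        | none => some x
        | some m =>
          if (decide (k1 m < k1 x) || !decide (k1 x < k1 m) && decide (k2 m < k2 x)) = true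
          then some x else some m)
      (some a) = some m := by
  induction t generalizing a with
  | nil => exact ⟨a, rfl⟩
  | cons x t ih =>
    simp only [List.foldl_cons]
    by_cases hb : (decide (k1 a < k1 x) || !decide (k1 x < k1 a) && decide (k2 a < k2 x)) = true
    · rw [if_pos hb]; exact ih x
    · rw [if_neg hb]; exact ih a

theorem pvMax2Some {α : Type} (xs : List α) (k1 k2 : α → Int) (h : xs ≠ []) :
    ∃ b, PySem.List.max2? xs k1 k2 = some b := by
  cases xs with
  | nil => exact absurd rfl h
  | cons x t =>
    unfold PySem.List.max2?
    simp only [List.foldl_cons]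
    exact pvMax2SomeAux k1 k2 t x

theorem pvLoopA (l : List Char) (d : PySem.Dict Char Int) (n : Int) :
    l.foldl
      (fun (s : PySem.Dict Char Int × Int) card =>
        if card = 'J' then (s.1, s.2 + 1)
        else (s.1.insert card (s.1.getD card 0 + 1), s.2)) (d, n)
    = ((l.filter (fun c => c ≠ 'J')).foldl (fun d c => d.insert c (d.getD c 0 + 1)) d,
        n + (l.count 'J' : Int)) := by
  induction l generalizing d n with
  | nil => simp
  | cons c t ih =>
    by_cases hc : c = 'J'
    · subst hc; simp [ih]; ring
    · simp [hc, ih]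

theorem pvAddFilter (p : Char → Bool) (acc : List Char) (c : Char) :
    (PySem.Set.add acc c).filter p
      = if p c then PySem.Set.add (acc.filter p) c else acc.filter p := by
  simp only [PySem.Set.add]
  by_cases hp : p c <;> by_cases hm : c ∈ acc <;>
    simp [hp, hm, List.filter_append]

theorem pvDedupFilterAux (p : Char → Bool) (l acc : List Char) :
    (l.foldl PySem.Set.add acc).filter p
      = (l.filter p).foldl PySem.Set.add (acc.filter p) := by
  induction l generalizing acc with
  | nil => simp
  | cons c t ih =>
    by_cases hp : p c <;> simp [hp, ih, pvAddFilter]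

theorem pvDedupFilter (l : List Char) (p : Char → Bool) :
    PySem.List.dedup (l.filter p) = (PySem.List.dedup l).filter p := by
  simp only [PySem.List.dedup, PySem.Set.ofList]
  rw [pvDedupFilterAux p l PySem.Set.empty]
  simp [PySem.Set.empty]

set_option maxRecDepth 4000 in
theorem pvFindEqIdxOf (c : Char) (hc : c ∈ ALL_CARDS_V2.toList) :
    PySem.Chars.find ALL_CARDS_V2.toList [c] = (ALL_CARDS_V2.toList.idxOf c : Int) := by
  have h : ALL_CARDS_V2.toList = ['J','2','3','4','5','6','7','8','9','T','Q','K','A'] := by decide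
  rw [h] at hc ⊢
  simp only [List.mem_cons, List.not_mem_nil, or_false] at hc
  rcases hc with rfl|rfl|rfl|rfl|rfl|rfl|rfl|rfl|rfl|rfl|rfl|rfl|rfl <;> decide

theorem pvSelectEq (ns : List Char) (m : Int) (b : Char)
    (hpre : ∀ c ∈ ns, c ∉ ALL_CARDS_V2.toList →
      (∀ e ∈ ns, ns.count e ≤ ns.count c) →
      ∀ d' ∈ ns, d' ≠ c → ns.count d' ≠ ns.count c)
    (hm : PySem.List.max? (PySem.Dict.counter ns).values (fun v => v) = some m)
    (hb : PySem.List.max2? (PySem.Dict.counter ns).keys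
        (fun c => (PySem.Dict.counter ns).getD c 0)
        (fun c => PySem.Chars.find ALL_CARDS_V2.toList [c]) = some b) :
    (if (((PySem.Dict.counter ns).items.filter (fun p => p.2 == m)).map (·.1)).length = 1
     then (((PySem.Dict.counter ns).items.filter (fun p => p.2 == m)).map (·.1)).headD 'J'
     else (PySem.List.max? (((PySem.Dict.counter ns).items.filter (fun p => p.2 == m)).map (·.1))
        (fun c => (ALL_CARDS_V2.toList.idxOf c : Int))).getD 'J') = b := by
  have hkeys : (PySem.Dict.counter ns).keys = PySem.Set.ofList ns := PySem.Dict.keys_counter ns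
  have hitems := PySem.Dict.items_counter ns
  have hvalues : (PySem.Dict.counter ns).values
      = (PySem.Set.ofList ns).map (fun k => (ns.count k : Int)) := by
    show (PySem.Dict.counter ns).items.map (·.2) = _
    rw [hitems]; simp [List.map_map, Function.comp]
  have hties : ((PySem.Dict.counter ns).items.filter (fun p => p.2 == m)).map (·.1)
      = (PySem.Set.ofList ns).filter (fun k => (ns.count k : Int) == m) := by
    rw [hitems, List.filter_map, List.map_map]
    simp [Function.comp_def]
  -- the maximum count m is attained
  have hmem := PySem.List.max?_mem hm
  rw [hvalues] at hmem
  obtain ⟨k0, hk0S, hk0⟩ := List.mem_map.mp hmem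
  have hallle : ∀ k ∈ PySem.Set.ofList ns, (ns.count k : Int) ≤ m := by
    intro k hk
    have := PySem.List.max?_isMax hm ((ns.count k : Int)) (by rw [hvalues]; exact List.mem_map_of_mem hk)
    simpa using this
  -- B's pick
  obtain ⟨hbS, hlex⟩ := pvMax2Spec _ _ _ _ hb
  rw [hkeys] at hbS hlex
  simp only [PySem.Dict.getD_counter] at hlex
  have hbm : (ns.count b : Int) = m := by
    have h1 := hallle b hbS
    have h2 := hlex k0 hk0S
    omega
  have hbties : b ∈ (PySem.Set.ofList ns).filter (fun k => (ns.count k : Int) == m) := by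
    rw [List.mem_filter]
    exact ⟨hbS, by simp [hbm]⟩
  rw [hties]
  set ties := (PySem.Set.ofList ns).filter (fun k => (ns.count k : Int) == m) with hT
  by_cases hlen : ties.length = 1
  · obtain ⟨c, hc⟩ := List.length_eq_one_iff.mp hlen
    rw [if_pos hlen, hc]
    have : b = c := by rw [hc] at hbties; simpa using hbties
    simp [this]
  · rw [if_neg hlen]
    have htne : ties ≠ [] := List.ne_nil_of_mem hbties
    -- A's tie-break pick
    obtain ⟨cA, hcA⟩ : ∃ cA, PySem.List.max? ties (fun c => (ALL_CARDS_V2.toList.idxOf c : Int)) = some cA := by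
      cases h : PySem.List.max? ties (fun c => (ALL_CARDS_V2.toList.idxOf c : Int)) with
      | none => exact absurd ((PySem.List.max?_eq_none_iff _ _).mp h) htne
      | some cA => exact ⟨cA, rfl⟩
    have hcAt := PySem.List.max?_mem hcA
    have hAmax := PySem.List.max?_isMax hcA
    -- ties has at least two elements
    have hlen2 : 2 ≤ ties.length := by
      have h0 : ties.length ≠ 0 := fun h => htne (List.length_eq_zero_iff.mp h)
      omega
    have hnodup : ties.Nodup := (PySem.Set.nodup_ofList ns).filter _
    -- every tied card is in ALL_CARDS_V2 (else Pre_ is violated)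
    have hcards : ∀ y ∈ ties, y ∈ ALL_CARDS_V2.toList := by
      intro y hy
      by_contra hnot
      obtain ⟨hyS, hym⟩ := List.mem_filter.mp hy
      have hym : (ns.count y : Int) = m := by simpa using hym
      have hyns : y ∈ ns := (PySem.Set.mem_ofList ns y).mp hyS
      have hymax : ∀ e ∈ ns, ns.count e ≤ ns.count y := by
        intro e he
        have := hallle e ((PySem.Set.mem_ofList ns e).mpr he)
        omega
      -- a second tied card
      have herase : ties.erase y ≠ [] := by
        intro hnil
        have : (ties.erase y).length = ties.length - 1 := List.length_erase_of_mem hy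
        rw [hnil] at this
        simp at this
        omega
      obtain ⟨z, hz⟩ := List.exists_mem_of_ne_nil _ herase
      have hzt : z ≠ y ∧ z ∈ ties := (List.Nodup.mem_erase_iff hnodup).mp hz
      obtain ⟨hzy, hzt⟩ := hzt
      obtain ⟨hzS, hzm⟩ := List.mem_filter.mp hzt
      have hzm : (ns.count z : Int) = m := by simpa using hzm
      have hzns : z ∈ ns := (PySem.Set.mem_ofList ns z).mp hzS
      exact hpre y hyns hnot hymax z hzns hzy (by omega)
    -- on members of ALL_CARDS_V2, B's rank (.find) is A's .index
    have hrank : ∀ y ∈ ties, PySem.Chars.find ALL_CARDS_V2.toList [y]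
        = (ALL_CARDS_V2.toList.idxOf y : Int) :=
      fun y hy => pvFindEqIdxOf y (hcards y hy)
    -- cA and b have equal rank, hence are equal
    have hcAm : (ns.count cA : Int) = m := by
      have := (List.mem_filter.mp hcAt).2
      simpa using this
    have hcAS : cA ∈ PySem.Set.ofList ns := (List.mem_filter.mp hcAt).1
    have h1 : PySem.Chars.find ALL_CARDS_V2.toList [cA] ≤ PySem.Chars.find ALL_CARDS_V2.toList [b] := by
      have := hlex cA hcAS
      omega
    have h2 := hAmax b hbties
    rw [hrank cA hcAt, hrank b hbties] at h1
    have hidx : ALL_CARDS_V2.toList.idxOf b = ALL_CARDS_V2.toList.idxOf cA := by omega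
    have : b = cA := (List.idxOf_inj (hcards b hbties) ).mp hidx
    rw [hcA]
    simp [this]

theorem pvPreForm (hand : String) (hpre : pvTieRaise hand = false) (hJ : 'J' ∈ hand.toList) :
    ∀ c ∈ hand.toList.filter (fun c => c ≠ 'J'), c ∉ ALL_CARDS_V2.toList →
      (∀ e ∈ hand.toList.filter (fun c => c ≠ 'J'),
        (hand.toList.filter (fun c => c ≠ 'J')).count e ≤ (hand.toList.filter (fun c => c ≠ 'J')).count c) →
      ∀ d' ∈ hand.toList.filter (fun c => c ≠ 'J'), d' ≠ c →
        (hand.toList.filter (fun c => c ≠ 'J')).count d' ≠ (hand.toList.filter (fun c => c ≠ 'J')).count c := by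
  intro c hc hnc hmax d' hd' hne heq
  have htrue : pvTieRaise hand = true := by
    unfold pvTieRaise
    simp only [Bool.and_eq_true, List.any_eq_true, List.all_eq_true, Bool.not_eq_true',
      List.contains_eq_mem, decide_eq_true_eq, beq_iff_eq, decide_eq_false_iff_not]
    exact ⟨hJ, c, hc, ⟨hnc, hmax⟩, d', hd', hne, heq⟩
  rw [htrue] at hpre
  cases hpre

theorem pvBdict (cs : List Char) :
    (PySem.List.dedup cs).foldl
      (fun (d : PySem.Dict Char Int) c =>
        if c ≠ 'J' then d.insert c ((cs.count c : Int)) else d)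
      PySem.Dict.empty
    = PySem.Dict.counter (cs.filter (fun c => c ≠ 'J')) := by
  rw [PySem.List.foldl_ite_eq_foldl_filter, ← pvDedupFilter]
  apply PySem.Dict.ext
  rw [PySem.Dict.items_foldl_insert_fresh _ (fun a => a) (fun a => ((cs.count a : Int))) _
    (by intro a _; rfl)
    (by simpa using PySem.Set.nodup_ofList (cs.filter (fun c => c ≠ 'J')))]
  rw [PySem.Dict.items_counter]
  simp only [PySem.List.dedup, PySem.Dict.empty, List.nil_append]
  apply List.map_congr_left
  intro a ha
  have hans : a ∈ cs.filter (fun c => c ≠ 'J') :=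
    (PySem.Set.mem_ofList _ a).mp ha
  have hane : (a ≠ 'J') := by simpa using (List.mem_filter.mp hans).2
  rw [List.count_filter (by simpa using hane)]

theorem pvMain (hand : String) (hpre : pvTieRaise hand = false) :
    getCountsOfEachCardV2 hand = getCountsOfEachCardV2_alt hand := by
  simp only [getCountsOfEachCardV2, getCountsOfEachCardV2_alt]
  rw [pvLoopA, PySem.Dict.foldl_insert_getD_add_one_eq_counter, pvBdict]
  simp only [zero_add]
  set ns := hand.toList.filter (fun c => c ≠ 'J') with hns
  set d := PySem.Dict.counter ns with hd
  set j := (hand.toList.count 'J' : Int) with hj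
  by_cases hjp : j > 0
  · simp only [if_pos hjp]
    by_cases hni : d.items ≠ []
    · simp only [if_pos hni]
      have hJ : 'J' ∈ hand.toList := by
        rw [hj] at hjp
        exact List.count_pos_iff.mp (by exact_mod_cast hjp)
      have hvne : d.values ≠ [] := by
        rw [hd]
        intro hv
        apply hni
        rw [hd]
        have : (PySem.Dict.counter ns).values = (PySem.Dict.counter ns).items.map (·.2) := rfl
        rw [this] at hv
        exact List.map_eq_nil_iff.mp hv
      obtain ⟨m, hmx⟩ : ∃ m, PySem.List.max? d.values (fun v => v) = some m := by
        cases h : PySem.List.max? d.values (fun v => v) with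
        | none => exact absurd ((PySem.List.max?_eq_none_iff _ _).mp h) hvne
        | some m => exact ⟨m, rfl⟩
      have hkne : d.keys ≠ [] := by
        rw [hd]
        intro hk
        apply hni
        rw [hd]
        have : (PySem.Dict.counter ns).keys = (PySem.Dict.counter ns).items.map (·.1) := rfl
        rw [this] at hk
        exact List.map_eq_nil_iff.mp hk
      obtain ⟨b, hbx⟩ := pvMax2Some d.keys
        (fun c => d.getD c 0) (fun c => PySem.Chars.find ALL_CARDS_V2.toList [c]) hkne
      simp only [hmx, hbx]
      have hsel := pvSelectEq ns m b (pvPreForm hand hpre hJ) (by rw [← hd]; exact hmx) (by rw [← hd]; exact hbx)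
      rw [hd] at *
      rw [hsel]
    · simp only [if_neg hni]
      have : PySem.List.pyGetD ALL_CARDS_V2.toList 0 'J' = 'J' := by decide
      rw [this]
  · simp only [if_neg hjp]

-- ===== VERDICT (by name: the statement is the Claim_ definition above) =====
theorem getCountsOfEachCardV2_spec : Claim_equal_getCountsOfEachCardV2 := by
  intro hand _ hpre
  unfold Spec_getCountsOfEachCardV2
  exact pvMain hand hpre
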